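-- pv_equiv track=rewrite | github.com/walkerlab/orcapod-python | src/orcapod/utils/function_info.py | _remove_docstrings_and_comments_fallback
-- ===== SOURCE A (Python) =====
-- def _is_in_string(line: str, pos: int) -> bool:
--     """Helper to check if a position in a line is inside a string literal."""
--     # This is a simplified check - would need proper parsing for robust handling
--     in_single = False
--     in_double = False
--     for i in range(pos):
--         if line[i] == "'" and not in_double and (i == 0 or line[i - 1] != "\\"):
--             in_single = not in_single
--         elif line[i] == '"' and not in_single and (i == 0 or line[i - 1] != "\\"):
--             in_double = not in_double
--     return in_single or in_double
--
-- def _remove_docstrings_and_comments_fallback(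
--     source: str, remove_docstrings: bool = True, remove_comments: bool = True
-- ) -> str:
--     """Fallback string-based processing."""
--     if remove_comments:
--         lines = source.split("\n")
--         for i, line in enumerate(lines):
--             comment_pos = line.find("#")
--             if comment_pos >= 0 and not _is_in_string(line, comment_pos):
--                 lines[i] = line[:comment_pos].rstrip()
--         source = "\n".join(lines)
--
--     # Simplified docstring removal (keeping original logic)
--     if remove_docstrings:
--         # This is basic - the AST approach above is more robust
--         pass
--
--     return source
-- ===== SOURCE B (Python) =====
-- def _strip_comment(line):
--     """One left-to-right pass: stop at the first '#', with string flags maintained inline."""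
--     in_single = in_double = False
--     prev = ""
--     for i, ch in enumerate(line):
--         if ch == "#":
--             return line[:i].rstrip() if not (in_single or in_double) else line
--         if ch == "'" and not in_double and prev != "\\":
--             in_single = not in_single
--         elif ch == '"' and not in_single and prev != "\\":
--             in_double = not in_double
--         prev = ch
--     return line
--
--
-- def _remove_docstrings_and_comments_fallback(
--     source: str, remove_docstrings: bool = True, remove_comments: bool = True
-- ) -> str:
--     if remove_comments:
--         source = "\n".join(_strip_comment(line) for line in source.split("\n"))
--     return source
-- ===== Notes on version B (the rewrite author's own statement) =====
-- stated objective: simpler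
-- what changed: A finds the comment marker with str.find and then re-scans the line prefix in a separate _is_in_string helper; B does one fused left-to-right scan per line that maintains the in_single/in_double flags inline and decides at the first comment marker whether to truncate+rstrip or leave the line, dropping the helper entirely.
import Mathlib
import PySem

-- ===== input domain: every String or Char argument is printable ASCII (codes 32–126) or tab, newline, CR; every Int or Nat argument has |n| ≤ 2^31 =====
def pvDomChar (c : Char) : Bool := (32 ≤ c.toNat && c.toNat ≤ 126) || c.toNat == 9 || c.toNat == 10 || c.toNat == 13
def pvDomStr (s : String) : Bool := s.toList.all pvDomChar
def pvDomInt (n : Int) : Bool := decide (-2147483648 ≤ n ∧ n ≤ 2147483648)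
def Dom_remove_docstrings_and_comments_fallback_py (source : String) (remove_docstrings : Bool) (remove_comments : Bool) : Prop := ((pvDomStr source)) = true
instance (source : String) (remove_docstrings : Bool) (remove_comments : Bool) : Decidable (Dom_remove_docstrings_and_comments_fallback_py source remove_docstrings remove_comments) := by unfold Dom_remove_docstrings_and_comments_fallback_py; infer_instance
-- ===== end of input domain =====

-- B fuses A's separate `line.find("#")` and `_is_in_string` prefix re-scan into ONE
-- left-to-right pass per line that maintains the string flags inline and stops at the
-- first '#' (objective: simpler — the helper and the second scan disappear).

-- ===== PORT A =====

-- one iteration of the `for i in range(pos)` loop of _is_in_string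
-- (indices produced by range(pos) are Nats with i < len(line), so List.getD is exact for line[i])
def pvStepA (line : List Char) (st : Bool × Bool) (i : Nat) : Bool × Bool :=
  if line.getD i ' ' = '\'' ∧ st.2 = false ∧ (i = 0 ∨ line.getD (i - 1) ' ' ≠ '\\') then
    (!st.1, st.2)
  else if line.getD i ' ' = '"' ∧ st.1 = false ∧ (i = 0 ∨ line.getD (i - 1) ' ' ≠ '\\') then
    (st.1, !st.2)
  else st

-- _is_in_string(line, pos)
def pvIsInString (line : List Char) (pos : Nat) : Bool :=
  let st := (List.range pos).foldl (pvStepA line) (false, false)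
  st.1 || st.2

-- body of A's per-line loop: lines[i] = line[:comment_pos].rstrip() when the test fires
def pvStripA (line : List Char) : List Char :=
  let comment_pos := PySem.Chars.find line ['#']
  if 0 ≤ comment_pos ∧ pvIsInString line comment_pos.toNat = false then
    PySem.Chars.rstrip (PySem.List.slice line none (some comment_pos))
  else line

def remove_docstrings_and_comments_fallback_py (source : String) (remove_docstrings : Bool) (remove_comments : Bool) : String :=
  -- `if remove_docstrings: pass` in A has no effect
  if remove_comments then
    String.ofList (PySem.Chars.join ['\n']
      ((PySem.Chars.splitOn source.toList ['\n']).map pvStripA))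
  else source

-- ===== PORT B =====

-- B's single scan per line: `rest` is the unvisited suffix, `kept` the visited prefix (= line[:i])
def pvStripBGo (line : List Char) : List Char → Bool → Bool → Option Char → List Char → List Char
  | [], _, _, _, _ => line
  | c :: rest, s, d, prev, kept =>
    if c = '#' then
      (if s = false ∧ d = false then PySem.Chars.rstrip kept else line)
    else if c = '\'' ∧ d = false ∧ prev ≠ some '\\' then
      pvStripBGo line rest (!s) d (some c) (kept ++ [c])
    else if c = '"' ∧ s = false ∧ prev ≠ some '\\' then
      pvStripBGo line rest s (!d) (some c) (kept ++ [c])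
    else
      pvStripBGo line rest s d (some c) (kept ++ [c])

-- _strip_comment(line)
def pvStripB (line : List Char) : List Char :=
  pvStripBGo line line false false none []

def remove_docstrings_and_comments_fallback_py_alt (source : String) (remove_docstrings : Bool) (remove_comments : Bool) : String :=
  if remove_comments then
    String.ofList (PySem.Chars.join ['\n']
      ((PySem.Chars.splitOn source.toList ['\n']).map pvStripB))
  else source

-- ===== PRECONDITION & SPEC =====
def Spec_remove_docstrings_and_comments_fallback_py (source : String) (remove_docstrings : Bool) (remove_comments : Bool) (out : String) : Prop := out = remove_docstrings_and_comments_fallback_py_alt source remove_docstrings remove_comments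
instance (source : String) (remove_docstrings : Bool) (remove_comments : Bool) (out : String) : Decidable (Spec_remove_docstrings_and_comments_fallback_py source remove_docstrings remove_comments out) := by unfold Spec_remove_docstrings_and_comments_fallback_py; infer_instance

-- ===== CLAIM (what is proved, stated in full; the proofs are below) =====
def Claim_equal_remove_docstrings_and_comments_fallback_py : Prop := ∀ (source : String) (remove_docstrings : Bool) (remove_comments : Bool), Dom_remove_docstrings_and_comments_fallback_py source remove_docstrings remove_comments → Spec_remove_docstrings_and_comments_fallback_py source remove_docstrings remove_comments (remove_docstrings_and_comments_fallback_py source remove_docstrings remove_comments)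

-- ===== LEMMAS AND PROOFS =====

-- proof-side structural reformulation of _is_in_string's flag scan
def pvScan : List Char → Option Char → Bool × Bool → Bool × Bool
  | [], _, st => st
  | c :: r, prev, st =>
    if c = '\'' ∧ st.2 = false ∧ prev ≠ some '\\' then pvScan r (some c) (!st.1, st.2)
    else if c = '"' ∧ st.1 = false ∧ prev ≠ some '\\' then pvScan r (some c) (st.1, !st.2)
    else pvScan r (some c) st

-- the `prev` value after scanning u, starting from prev0
def pvLastPrev (u : List Char) (prev0 : Option Char) : Option Char :=
  u.foldl (fun _ c => some c) prev0

theorem pvScan_snoc (u : List Char) (c : Char) (prev : Option Char) (st : Bool × Bool) :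
    pvScan (u ++ [c]) prev st = pvScan [c] (pvLastPrev u prev) (pvScan u prev st) := by
  induction u generalizing prev st with
  | nil => rfl
  | cons a u ih =>
    rw [List.cons_append]
    conv_lhs => simp only [pvScan]
    conv_rhs => rw [show pvLastPrev (a :: u) prev = pvLastPrev u (some a) from rfl]
    split_ifs with h1 h2
    · rw [ih]; congr 1; conv_rhs => simp only [pvScan]; rw [if_pos h1]
    · rw [ih]; congr 1; conv_rhs => simp only [pvScan]; rw [if_neg h1, if_pos h2]
    · rw [ih]; congr 1; conv_rhs => simp only [pvScan]; rw [if_neg h1, if_neg h2]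

theorem pvLastPrev_eq (u : List Char) (prev : Option Char) :
    pvLastPrev u prev = u.getLast?.or prev := by
  induction u generalizing prev with
  | nil => rfl
  | cons a u ih =>
    rw [show pvLastPrev (a :: u) prev = pvLastPrev u (some a) from rfl, ih]
    cases u with
    | nil => rfl
    | cons b v =>
      rw [List.getLast?_cons_cons]
      cases hx : (b :: v).getLast? with
      | none => simp at hx
      | some x => simp

theorem pvTakeLast (l : List Char) (j : Nat) (hj : j < l.length) :
    (l.take (j + 1)).getLast? = some l[j] := by
  rw [List.getLast?_eq_getElem?]
  have h1 : (l.take (j + 1)).length = j + 1 := by simp [List.length_take]; omega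
  rw [h1]
  simp [hj]

theorem pvStepA_eq_scan (l : List Char) (k : Nat) (hkl : k < l.length) (st : Bool × Bool) :
    pvStepA l st k = pvScan [l[k]] (pvLastPrev (l.take k) none) st := by
  have hget : l.getD k ' ' = l[k] := List.getD_eq_getElem l ' ' hkl
  have hprev : (k = 0 ∨ l.getD (k - 1) ' ' ≠ '\\') ↔ pvLastPrev (l.take k) none ≠ some '\\' := by
    rw [pvLastPrev_eq]
    cases k with
    | zero => simp
    | succ j =>
      have hj : j < l.length := by omega
      rw [pvTakeLast l j hj]
      have : l.getD (j + 1 - 1) ' ' = l[j] := by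
        simpa using List.getD_eq_getElem l ' ' hj
      rw [this]
      simp
  unfold pvStepA
  conv_rhs => simp only [pvScan]
  rw [hget]
  by_cases h1 : l[k] = '\'' ∧ st.2 = false ∧ (k = 0 ∨ l.getD (k - 1) ' ' ≠ '\\')
  · rw [if_pos h1, if_pos ⟨h1.1, h1.2.1, hprev.mp h1.2.2⟩]
  · have h1' : ¬(l[k] = '\'' ∧ st.2 = false ∧ pvLastPrev (l.take k) none ≠ some '\\') :=
      fun hc => h1 ⟨hc.1, hc.2.1, hprev.mpr hc.2.2⟩
    rw [if_neg h1, if_neg h1']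
    by_cases h2 : l[k] = '"' ∧ st.1 = false ∧ (k = 0 ∨ l.getD (k - 1) ' ' ≠ '\\')
    · rw [if_pos h2, if_pos ⟨h2.1, h2.2.1, hprev.mp h2.2.2⟩]
    · have h2' : ¬(l[k] = '"' ∧ st.1 = false ∧ pvLastPrev (l.take k) none ≠ some '\\') :=
        fun hc => h2 ⟨hc.1, hc.2.1, hprev.mpr hc.2.2⟩
      rw [if_neg h2, if_neg h2']

theorem pvFold_eq_scan (l : List Char) (k : Nat) (hk : k ≤ l.length) :
    (List.range k).foldl (pvStepA l) (false, false) = pvScan (l.take k) none (false, false) := by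
  induction k with
  | zero => rfl
  | succ k ih =>
    have hkl : k < l.length := hk
    rw [List.range_succ, List.foldl_append, ih (le_of_lt hkl),
        ← List.take_concat_get hkl, List.concat_eq_append, pvScan_snoc]
    exact pvStepA_eq_scan l k hkl _

theorem pvStripBGo_no_hash (line : List Char) (r : List Char) : ∀ (s d : Bool)
    (prev : Option Char) (kept : List Char), '#' ∉ r → pvStripBGo line r s d prev kept = line := by
  induction r with
  | nil => intro _ _ _ _ _; rfl
  | cons c rest ih =>
    intro s d prev kept h
    have hc : ¬ c = '#' := fun hh => h (hh ▸ List.mem_cons_self)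
    have hr : '#' ∉ rest := fun hh => h (List.mem_cons_of_mem _ hh)
    conv_lhs => simp only [pvStripBGo]
    rw [if_neg hc]
    split_ifs <;> exact ih _ _ _ _ hr

theorem pvStripBGo_hash (line v : List Char) (u : List Char) (hu : '#' ∉ u) :
    ∀ (s d : Bool) (prev : Option Char) (kept : List Char),
    pvStripBGo line (u ++ '#' :: v) s d prev kept =
      if (pvScan u prev (s, d)).1 = false ∧ (pvScan u prev (s, d)).2 = false then
        PySem.Chars.rstrip (kept ++ u)
      else line := by
  induction u with
  | nil =>
    intro s d prev kept
    conv_lhs => simp only [List.nil_append, pvStripBGo]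
    rw [if_pos trivial]
    simp [pvScan]
  | cons c u ih =>
    intro s d prev kept
    have hc : ¬ c = '#' := fun hh => hu (hh ▸ List.mem_cons_self)
    have hu' : '#' ∉ u := fun hh => hu (List.mem_cons_of_mem _ hh)
    rw [List.cons_append]
    conv_lhs => simp only [pvStripBGo]
    rw [if_neg hc]
    conv_rhs => simp only [pvScan]
    split_ifs with h1 h2 <;>
      rw [ih hu'] <;> simp only [List.append_assoc, List.singleton_append] <;> split_ifs <;> simp_all

theorem pvFind_hash (u v : List Char) (hu : '#' ∉ u) :
    PySem.Chars.find (u ++ '#' :: v) ['#'] = (u.length : Int) := by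
  have hinf : ['#'] <:+: (u ++ '#' :: v) := ⟨u, v, by simp⟩
  have h0 : 0 ≤ PySem.Chars.find (u ++ '#' :: v) ['#'] :=
    (PySem.Chars.find_nonneg_iff _ _).mpr hinf
  obtain ⟨hpre, hmin⟩ := PySem.Chars.find_spec h0
  have hlen : (PySem.Chars.find (u ++ '#' :: v) ['#']).toNat = u.length := by
    rcases Nat.lt_trichotomy (PySem.Chars.find (u ++ '#' :: v) ['#']).toNat u.length with hlt | heq | hgt
    · exfalso
      obtain ⟨t, ht⟩ := hpre
      have hh : (u ++ '#' :: v)[(PySem.Chars.find (u ++ '#' :: v) ['#']).toNat]? = some '#' := by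
        rw [← List.head?_drop, ← ht]; rfl
      rw [List.getElem?_append_left hlt, List.getElem?_eq_getElem hlt] at hh
      exact hu (Option.some_injective _ hh ▸ List.getElem_mem hlt)
    · exact heq
    · exact absurd ⟨v, by rw [List.drop_left]; rfl⟩ (hmin u.length hgt)
  have := Int.toNat_of_nonneg h0
  omega

theorem pvStrip_eq (l : List Char) : pvStripA l = pvStripB l := by
  by_cases h : '#' ∈ l
  · obtain ⟨u, v, hl, hu⟩ : ∃ u v, l = u ++ '#' :: v ∧ '#' ∉ u := by
      have hwne : l.dropWhile (· ≠ '#') ≠ [] := by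
        intro hw
        rw [List.dropWhile_eq_nil_iff] at hw
        simpa using hw _ h
      obtain ⟨c, v, hcv⟩ : ∃ c v, l.dropWhile (· ≠ '#') = c :: v := by
        cases hw : l.dropWhile (· ≠ '#') with
        | nil => exact absurd hw hwne
        | cons c v => exact ⟨c, v, rfl⟩
      have hc : c = '#' := by
        have hH := List.head_dropWhile_not (fun x => decide (x ≠ '#')) hwne
        have h2 : (l.dropWhile (fun x => decide (x ≠ '#'))).head hwne = c := by
          have h3 := List.head?_eq_some_head hwne
          have h4 : (l.dropWhile (fun x => decide (x ≠ '#'))).head? = some c := by rw [hcv]; rfl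
          exact Option.some_injective _ (h3.symm.trans h4)
        rw [h2] at hH
        simpa using hH
      subst hc
      refine ⟨l.takeWhile (· ≠ '#'), v, ?_, ?_⟩
      · rw [← hcv, List.takeWhile_append_dropWhile]
      · intro hm
        simpa using List.mem_takeWhile_imp hm
    subst hl
    simp only [pvStripA, pvStripB]
    rw [pvFind_hash u v hu]
    have h0 : (0:Int) ≤ (u.length : Int) := Int.natCast_nonneg _
    rw [PySem.List.slice_to _ h0]
    have hle : u.length ≤ (u ++ '#' :: v).length := by simp
    have hIs : pvIsInString (u ++ '#' :: v) u.length =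
        ((pvScan u none (false, false)).1 || (pvScan u none (false, false)).2) := by
      simp only [pvIsInString]
      rw [pvFold_eq_scan _ u.length hle, List.take_left]
    simp only [Int.toNat_natCast, hIs, List.take_left]
    rw [pvStripBGo_hash _ v u hu]
    rcases hst : pvScan u none (false, false) with ⟨s, d⟩
    by_cases hs : s = false ∧ d = false
    · rw [if_pos ⟨h0, by simp [hs.1, hs.2]⟩, if_pos (by simpa using hs)]
      simp
    · rw [if_neg (fun hc => hs (by simpa using hc.2)), if_neg (by simpa using hs)]
  · have hfind : PySem.Chars.find l ['#'] = -1 :=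
      (PySem.Chars.find_eq_neg_one_iff _ _).mpr (fun hinf => h (hinf.subset (by simp)))
    simp only [pvStripA, pvStripB, hfind]
    rw [if_neg (by norm_num)]
    exact (pvStripBGo_no_hash l l false false none [] h).symm

-- ===== VERDICT (by name: the statement is the Claim_ definition above) =====
theorem remove_docstrings_and_comments_fallback_py_spec : Claim_equal_remove_docstrings_and_comments_fallback_py := by
  intro source rd rc _
  unfold Spec_remove_docstrings_and_comments_fallback_py
  unfold remove_docstrings_and_comments_fallback_py remove_docstrings_and_comments_fallback_py_alt
  cases rc
  · rfl
  · simp only [if_pos]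
    rw [List.map_congr_left (fun l _ => pvStrip_eq l)]
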